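-- pv_equiv track=rewrite | github.com/Gelbpunkt/IdleRPG | cogs/gambling.py | calc_aces
-- ===== SOURCE A (Python) =====
-- def calc_aces(value, aces):
--     missing = 21 - value
--     num_11 = 0
--     num_1 = 0
--     for i in range(aces):
--         if missing < 11:
--             num_1 += 1
--             missing -= 1
--         else:
--             num_11 += 1
--             missing -= 1
--     return num_11 * 11 + num_1
-- ===== SOURCE B (Python) =====
-- def calc_aces(value, aces):
--     n = aces if aces > 0 else 0
--     num_11 = max(0, min(n, 11 - value))
--     return n + 10 * num_11
-- ===== Notes on version B (the rewrite author's own statement) =====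
-- stated objective: simpler
-- what changed: Replaced the per-ace loop and its three state variables with a closed form: the number of aces counted as 11 is clamp(11 - value, 0, aces), so the result is max(0, aces) + 10 * that number.
import Mathlib
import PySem

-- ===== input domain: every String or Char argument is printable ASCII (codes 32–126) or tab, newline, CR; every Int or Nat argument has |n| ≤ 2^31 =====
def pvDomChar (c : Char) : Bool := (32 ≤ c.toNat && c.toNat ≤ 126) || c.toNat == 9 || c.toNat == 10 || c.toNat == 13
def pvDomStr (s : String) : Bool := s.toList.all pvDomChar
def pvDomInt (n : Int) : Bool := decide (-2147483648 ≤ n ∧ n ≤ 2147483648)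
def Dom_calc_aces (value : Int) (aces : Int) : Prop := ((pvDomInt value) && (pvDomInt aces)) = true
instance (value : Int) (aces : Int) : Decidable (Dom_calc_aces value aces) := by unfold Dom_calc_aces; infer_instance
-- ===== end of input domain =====

-- B replaces A's per-ace loop by a closed form (clamp of 11 - value) — simpler, O(1).


-- ===== PORT A =====
-- state (missing, num_11, num_1), folded over range(aces)
def calc_aces (value : Int) (aces : Int) : Int :=
  let missing : Int := 21 - value
  let s := (PySem.List.pyRange 0 aces 1).foldl
    (fun (st : Int × Int × Int) _ =>
      let (missing, num_11, num_1) := st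
      if missing < 11 then (missing - 1, num_11, num_1 + 1)
      else (missing - 1, num_11 + 1, num_1))
    (missing, 0, 0)
  s.2.1 * 11 + s.2.2

-- ===== PORT B =====
def calc_aces_alt (value : Int) (aces : Int) : Int :=
  let n : Int := if aces > 0 then aces else 0
  let num_11 : Int := max 0 (min n (11 - value))
  n + 10 * num_11

-- ===== PRECONDITION & SPEC =====
def Spec_calc_aces (value : Int) (aces : Int) (out : Int) : Prop := out = calc_aces_alt value aces
instance (value : Int) (aces : Int) (out : Int) : Decidable (Spec_calc_aces value aces out) := by unfold Spec_calc_aces; infer_instance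

-- ===== CLAIM (what is proved, stated in full; the proofs are below) =====
def Claim_equal_calc_aces : Prop := ∀ (value : Int) (aces : Int), Dom_calc_aces value aces → Spec_calc_aces value aces (calc_aces value aces)

-- ===== LEMMAS AND PROOFS =====
theorem calc_aces_foldl (l : List Int) (m a11 a1 : Int) :
    (let s := l.foldl
      (fun (st : Int × Int × Int) _ =>
        let (missing, num_11, num_1) := st
        if missing < 11 then (missing - 1, num_11, num_1 + 1)
        else (missing - 1, num_11 + 1, num_1))
      (m, a11, a1)
     s.2.1 * 11 + s.2.2) =
    a11 * 11 + a1 + l.length + 10 * min (l.length : Int) (max 0 (m - 10)) := by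
  induction l generalizing m a11 a1 with
  | nil => simp
  | cons x xs ih =>
    simp only [List.foldl_cons, List.length_cons]
    by_cases h : m < 11
    · rw [if_pos h, ih]
      push_cast
      omega
    · rw [if_neg h, ih]
      push_cast
      omega

-- ===== VERDICT (by name: the statement is the Claim_ definition above) =====
theorem calc_aces_spec : Claim_equal_calc_aces := by
  intro value aces _
  unfold Spec_calc_aces calc_aces calc_aces_alt
  rw [calc_aces_foldl]
  rw [PySem.List.length_pyRange_one]
  have h : ((aces - 0).toNat : Int) = max 0 aces := by omega
  rw [h]
  dsimp only
  split_ifs <;> omega
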